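-- pv_equiv track=rewrite | github.com/DEVADATH001/Quantum-AI-Research-Series | 04-Optimization-QAOA-MaxCut/src/hamiltonian_builder.py | bitstring_to_partition
-- ===== SOURCE A (Python) =====
-- from typing import Tuple, Optional
--
-- def bitstring_to_partition(
--
--     bitstring: str
-- ) -> Tuple[set, set]:
--     """
--     Convert bitstring to node partitions.
--
--     Args:
--         bitstring: Binary string where 0→partition A, 1→partition B
--
--     Returns:
--         Tuple of (partition_A, partition_B) as sets
--     """
--     partition_a = set()
--     partition_b = set()
--
--     for i, bit in enumerate(bitstring):
--         if bit == '0':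
--             partition_a.add(i)
--         else:
--             partition_b.add(i)
--
--     return partition_a, partition_b
-- ===== SOURCE B (Python) =====
-- def bitstring_to_partition(bitstring):
--     def go(s, off):
--         n = len(s)
--         if n == 0:
--             return set(), set()
--         if n == 1:
--             return ({off}, set()) if s == '0' else (set(), {off})
--         m = n // 2
--         a1, b1 = go(s[:m], off)
--         a2, b2 = go(s[m:], off + m)
--         return a1 | a2, b1 | b2
--     return go(bitstring, 0)
-- ===== Notes on version B (the rewrite author's own statement) =====
-- stated objective: alternative
-- what changed: Replaces A's single left-to-right enumerate loop with a divide-and-conquer recursion: the string is split at the midpoint, each half is partitioned recursively with an index offset, and the two halves' partitions are merged by set union.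
import Mathlib
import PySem

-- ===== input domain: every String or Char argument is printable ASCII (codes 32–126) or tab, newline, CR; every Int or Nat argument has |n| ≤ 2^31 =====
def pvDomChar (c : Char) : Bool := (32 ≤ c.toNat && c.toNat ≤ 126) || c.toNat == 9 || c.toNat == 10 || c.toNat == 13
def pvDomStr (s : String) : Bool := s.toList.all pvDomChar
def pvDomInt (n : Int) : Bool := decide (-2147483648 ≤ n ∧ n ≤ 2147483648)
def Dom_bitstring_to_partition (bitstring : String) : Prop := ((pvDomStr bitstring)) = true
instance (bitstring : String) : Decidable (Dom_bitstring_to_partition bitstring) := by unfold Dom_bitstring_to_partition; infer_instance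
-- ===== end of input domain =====

-- B partitions the indices by divide-and-conquer on the string (split at the midpoint, recurse, union the halves) instead of A's single enumerate loop (objective: alternative).


-- ===== PORT A =====
-- for i, bit in enumerate(bitstring): add i to partition_a if bit == '0' else to partition_b
def bitstring_to_partition (bitstring : String) : List Int × List Int :=
  (PySem.List.enumerate bitstring.toList).foldl
    (fun (p : PySem.Set Int × PySem.Set Int) ib =>
      if ib.2 == '0' then (PySem.Set.add p.1 ib.1, p.2) else (p.1, PySem.Set.add p.2 ib.1))
    (PySem.Set.empty, PySem.Set.empty)

-- ===== PORT B =====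
-- go(s, off): empty → two empty sets; one char → a singleton on the matching side;
-- otherwise split at m = n // 2 (s[:m] = take m, s[m:] = drop m, exact for 0 ≤ m ≤ n),
-- recurse on both halves and union the results.
def pvGo (s : List Char) (off : Int) : List Int × List Int :=
  if s.length = 0 then (PySem.Set.empty, PySem.Set.empty)
  else if s.length = 1 then
    if s == ['0'] then (PySem.Set.add PySem.Set.empty off, PySem.Set.empty)
    else (PySem.Set.empty, PySem.Set.add PySem.Set.empty off)
  else
    let m := s.length / 2
    let p1 := pvGo (s.take m) off
    let p2 := pvGo (s.drop m) (off + (m : Int))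
    (PySem.Set.union p1.1 p2.1, PySem.Set.union p1.2 p2.2)
termination_by s.length
decreasing_by
  · simp only [List.length_take]; omega
  · simp only [List.length_drop]; omega

def bitstring_to_partition_alt (bitstring : String) : List Int × List Int :=
  pvGo bitstring.toList 0

-- ===== PRECONDITION & SPEC =====
def Spec_bitstring_to_partition (bitstring : String) (out : List Int × List Int) : Prop := out = bitstring_to_partition_alt bitstring
instance (bitstring : String) (out : List Int × List Int) : Decidable (Spec_bitstring_to_partition bitstring out) := by unfold Spec_bitstring_to_partition; infer_instance

-- ===== CLAIM (what is proved, stated in full; the proofs are below) =====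
def Claim_equal_bitstring_to_partition : Prop := ∀ (bitstring : String), Dom_bitstring_to_partition bitstring → Spec_bitstring_to_partition bitstring (bitstring_to_partition bitstring)

-- ===== LEMMAS AND PROOFS =====

-- the indices of '0' bits (zl) / non-'0' bits (ol) in cs, counting from k
def zl (cs : List Char) (k : Int) : List Int :=
  ((PySem.List.enumerate cs k).filter (fun ib => ib.2 == '0')).map (fun ib => ib.1)
def ol (cs : List Char) (k : Int) : List Int :=
  ((PySem.List.enumerate cs k).filter (fun ib => !(ib.2 == '0'))).map (fun ib => ib.1)

theorem zl_cons_zero (c : Char) (cs : List Char) (k : Int) (h : (c == '0') = true) :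
    zl (c :: cs) k = k :: zl cs (k + 1) := by
  simp [zl, PySem.List.enumerate_cons, h]

theorem zl_cons_one (c : Char) (cs : List Char) (k : Int) (h : (c == '0') = false) :
    zl (c :: cs) k = zl cs (k + 1) := by
  simp [zl, PySem.List.enumerate_cons, h]

theorem ol_cons_zero (c : Char) (cs : List Char) (k : Int) (h : (c == '0') = true) :
    ol (c :: cs) k = ol cs (k + 1) := by
  simp [ol, PySem.List.enumerate_cons, h]

theorem ol_cons_one (c : Char) (cs : List Char) (k : Int) (h : (c == '0') = false) :
    ol (c :: cs) k = k :: ol cs (k + 1) := by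
  simp [ol, PySem.List.enumerate_cons, h]

theorem zl_bounds (cs : List Char) (k : Int) :
    ∀ x ∈ zl cs k, k ≤ x ∧ x < k + cs.length := by
  induction cs generalizing k with
  | nil => simp [zl, PySem.List.enumerate]
  | cons c cs ih =>
    intro x hx
    simp only [List.length_cons]
    cases hc : (c == '0')
    · rw [zl_cons_one c cs k hc] at hx
      have := ih (k + 1) x hx; push_cast; omega
    · rw [zl_cons_zero c cs k hc] at hx
      rcases List.mem_cons.1 hx with h | h
      · push_cast; omega
      · have := ih (k + 1) x h; push_cast; omega

theorem ol_bounds (cs : List Char) (k : Int) :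
    ∀ x ∈ ol cs k, k ≤ x ∧ x < k + cs.length := by
  induction cs generalizing k with
  | nil => simp [ol, PySem.List.enumerate]
  | cons c cs ih =>
    intro x hx
    simp only [List.length_cons]
    cases hc : (c == '0')
    · rw [ol_cons_one c cs k hc] at hx
      rcases List.mem_cons.1 hx with h | h
      · push_cast; omega
      · have := ih (k + 1) x h; push_cast; omega
    · rw [ol_cons_zero c cs k hc] at hx
      have := ih (k + 1) x hx; push_cast; omega

theorem zl_append (xs ys : List Char) (k : Int) :
    zl (xs ++ ys) k = zl xs k ++ zl ys (k + xs.length) := by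
  simp [zl, PySem.List.enumerate_append]

theorem ol_append (xs ys : List Char) (k : Int) :
    ol (xs ++ ys) k = ol xs k ++ ol ys (k + xs.length) := by
  simp [ol, PySem.List.enumerate_append]

theorem zl_nodup (cs : List Char) (k : Int) : (zl cs k).Nodup := by
  induction cs generalizing k with
  | nil => simp [zl, PySem.List.enumerate]
  | cons c cs ih =>
    cases hc : (c == '0')
    · rw [zl_cons_one c cs k hc]; exact ih (k + 1)
    · rw [zl_cons_zero c cs k hc]
      refine List.nodup_cons.2 ⟨fun hm => ?_, ih (k + 1)⟩
      have := (zl_bounds cs (k + 1) k hm).1; omega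

theorem ol_nodup (cs : List Char) (k : Int) : (ol cs k).Nodup := by
  induction cs generalizing k with
  | nil => simp [ol, PySem.List.enumerate]
  | cons c cs ih =>
    cases hc : (c == '0')
    · rw [ol_cons_one c cs k hc]
      refine List.nodup_cons.2 ⟨fun hm => ?_, ih (k + 1)⟩
      have := (ol_bounds cs (k + 1) k hm).1; omega
    · rw [ol_cons_zero c cs k hc]; exact ih (k + 1)

-- union of disjoint nodup lists is append
theorem union_disjoint {s t : PySem.Set Int} (ht : t.Nodup) (hd : ∀ x ∈ t, x ∉ s) :
    PySem.Set.union s t = s ++ t := by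
  induction t generalizing s with
  | nil => simp [PySem.Set.union, PySem.Set.update]
  | cons x t ih =>
    have hx : x ∉ s := hd x (List.mem_cons_self)
    have : PySem.Set.union s (x :: t) = PySem.Set.union (s ++ [x]) t := by
      simp [PySem.Set.union, PySem.Set.update, PySem.Set.add_of_not_mem hx]
    rw [this, ih (List.nodup_cons.1 ht).2 (by
      intro y hy
      rcases List.nodup_cons.1 ht with ⟨hxt, _⟩
      intro hmem
      rcases List.mem_append.1 hmem with h | h
      · exact hd y (List.mem_cons_of_mem _ hy) h
      · simp at h; subst h; exact hxt hy)]
    simp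

-- A's fold appends the zero-indices / other-indices to the accumulators
theorem fold_eq (cs : List Char) (k : Int) (pa pb : PySem.Set Int)
    (ha : ∀ x ∈ pa, x < k) (hb : ∀ x ∈ pb, x < k) :
    (PySem.List.enumerate cs k).foldl
      (fun (p : PySem.Set Int × PySem.Set Int) ib =>
        if ib.2 == '0' then (PySem.Set.add p.1 ib.1, p.2) else (p.1, PySem.Set.add p.2 ib.1))
      (pa, pb) = (pa ++ zl cs k, pb ++ ol cs k) := by
  induction cs generalizing k pa pb with
  | nil => simp [zl, ol, PySem.List.enumerate]
  | cons c cs ih =>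
    rw [PySem.List.enumerate_cons, List.foldl_cons]
    cases hc : (c == '0')
    · have hnm : k ∉ pb := fun h => absurd (hb k h) (by omega)
      rw [zl_cons_one c cs k hc, ol_cons_one c cs k hc]
      simp only [Bool.false_eq_true, reduceIte, PySem.Set.add_of_not_mem hnm]
      rw [ih (k + 1) pa (pb ++ [k])
        (by intro x hx; have := ha x hx; omega)
        (by intro x hx; rcases List.mem_append.1 hx with h | h
            · have := hb x h; omega
            · simp at h; omega)]
      simp
    · have hnm : k ∉ pa := fun h => absurd (ha k h) (by omega)
      rw [zl_cons_zero c cs k hc, ol_cons_zero c cs k hc]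
      simp only [reduceIte, PySem.Set.add_of_not_mem hnm]
      rw [ih (k + 1) (pa ++ [k]) pb
        (by intro x hx; rcases List.mem_append.1 hx with h | h
            · have := ha x h; omega
            · simp at h; omega)
        (by intro x hx; have := hb x hx; omega)]
      simp

-- B's recursion computes exactly the zero-index / other-index lists
theorem pvGo_eq (s : List Char) (off : Int) : pvGo s off = (zl s off, ol s off) := by
  induction s, off using pvGo.induct with
  | case1 s off h0 =>
    have : s = [] := List.length_eq_zero_iff.1 h0
    subst this
    simp [pvGo, zl, ol, PySem.List.enumerate, PySem.Set.empty]
  | case2 s off h0 h1 h2 =>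
    obtain ⟨c, hc⟩ := List.length_eq_one_iff.1 h1
    subst hc
    have hcz : (c == '0') = true := by
      have := h2
      simpa using this
    rw [pvGo]
    simp only [if_pos h2]
    rw [zl_cons_zero c [] off hcz, ol_cons_zero c [] off hcz]
    simp [zl, ol, PySem.List.enumerate, PySem.Set.add, PySem.Set.empty]
  | case3 s off h0 h1 h2 =>
    obtain ⟨c, hc⟩ := List.length_eq_one_iff.1 h1
    subst hc
    have hcz : (c == '0') = false := by
      cases h : (c == '0')
      · rfl
      · exact absurd (by simpa using h : ([c] : List Char) == ['0']) (by simp_all)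
    rw [pvGo]
    simp only [if_neg h2]
    rw [zl_cons_one c [] off hcz, ol_cons_one c [] off hcz]
    simp [zl, ol, PySem.List.enumerate, PySem.Set.add, PySem.Set.empty]
  | case4 s off h0 h1 m ih1 ih2 =>
    rw [pvGo]
    simp only [if_neg h0, if_neg h1]
    have e1 : pvGo (s.take (s.length / 2)) off
        = (zl (s.take (s.length / 2)) off, ol (s.take (s.length / 2)) off) := ih1
    have e2 : pvGo (s.drop (s.length / 2)) (off + ((s.length / 2 : Nat) : Int))
        = (zl (s.drop (s.length / 2)) (off + ((s.length / 2 : Nat) : Int)),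
           ol (s.drop (s.length / 2)) (off + ((s.length / 2 : Nat) : Int))) := ih2
    simp only [e1, e2]
    have hlen : ((s.take (s.length / 2)).length : Int) = ((s.length / 2 : Nat) : Int) := by
      simp [List.length_take]; omega
    have hsplit : s.take (s.length / 2) ++ s.drop (s.length / 2) = s :=
      List.take_append_drop (s.length / 2) s
    have hzl : zl s off = zl (s.take (s.length / 2)) off
        ++ zl (s.drop (s.length / 2)) (off + ((s.length / 2 : Nat) : Int)) := by
      conv_lhs => rw [← hsplit]
      rw [zl_append, hlen]
    have hol : ol s off = ol (s.take (s.length / 2)) off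
        ++ ol (s.drop (s.length / 2)) (off + ((s.length / 2 : Nat) : Int)) := by
      conv_lhs => rw [← hsplit]
      rw [ol_append, hlen]
    rw [union_disjoint (zl_nodup _ _) (by
        intro x hx
        have h2b := (zl_bounds (s.drop (s.length / 2)) (off + ((s.length / 2 : Nat) : Int)) x hx).1
        intro hmem
        have h1b := (zl_bounds (s.take (s.length / 2)) off x hmem).2
        rw [hlen] at h1b; omega),
      union_disjoint (ol_nodup _ _) (by
        intro x hx
        have h2b := (ol_bounds (s.drop (s.length / 2)) (off + ((s.length / 2 : Nat) : Int)) x hx).1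
        intro hmem
        have h1b := (ol_bounds (s.take (s.length / 2)) off x hmem).2
        rw [hlen] at h1b; omega)]
    rw [← hzl, ← hol]

-- ===== VERDICT (by name: the statement is the Claim_ definition above) =====
theorem bitstring_to_partition_spec : Claim_equal_bitstring_to_partition := by
  intro bs _
  show bitstring_to_partition bs = bitstring_to_partition_alt bs
  have hA : bitstring_to_partition bs = (zl bs.toList 0, ol bs.toList 0) := by
    unfold bitstring_to_partition
    rw [fold_eq bs.toList 0 PySem.Set.empty PySem.Set.empty
      (by simp [PySem.Set.empty]) (by simp [PySem.Set.empty])]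
    simp [PySem.Set.empty]
  rw [hA, bitstring_to_partition_alt, pvGo_eq]
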